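-- pv_equiv track=rewrite | github.com/kaganndemirr/ALO-JSS | alo.py | update_job_list
-- ===== SOURCE A (Python) =====
-- import copy
--
-- def update_job_list(initial_solution_arg):
--     local_job_dict = copy.deepcopy(initial_solution_arg)
--     local_job_dict_copy = copy.deepcopy(initial_solution_arg)
--     dict_list = list(local_job_dict.items())
--     dict_list_copy = list(local_job_dict_copy.items())
--     i = 0
--     while i < len(dict_list):
--         k = i
--         if i != 0:
--             j = i - 1
--             while k < len(dict_list):
--                 # dict_list[k][1][0] = dict_list[j][1][1] + dict_list[k][1][0]
--                 dict_list[k][1][1] = dict_list[j][1][1] + dict_list_copy[k][1][1]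
--                 k += 1
--         i += 1
--
--     return dict(dict_list)
-- ===== SOURCE B (Python) =====
-- def update_job_list(initial_solution_arg):
--     result = {}
--     total = 0
--     for key, value in initial_solution_arg.items():
--         new_value = list(value)
--         total += new_value[1]
--         new_value[1] = total
--         result[key] = new_value
--     return result
-- ===== Notes on version B (the rewrite author's own statement) =====
-- stated objective: faster
-- what changed: A recomputes the whole suffix of index-1 values from a frozen copy in a nested while loop (O(n^2) writes); B makes one pass with a running total, writing each prefix sum once.
-- outside the precondition, e.g. on update_job_list({'a': [5]}): A returns {'a': [5]}, B raises IndexError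
import Mathlib
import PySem

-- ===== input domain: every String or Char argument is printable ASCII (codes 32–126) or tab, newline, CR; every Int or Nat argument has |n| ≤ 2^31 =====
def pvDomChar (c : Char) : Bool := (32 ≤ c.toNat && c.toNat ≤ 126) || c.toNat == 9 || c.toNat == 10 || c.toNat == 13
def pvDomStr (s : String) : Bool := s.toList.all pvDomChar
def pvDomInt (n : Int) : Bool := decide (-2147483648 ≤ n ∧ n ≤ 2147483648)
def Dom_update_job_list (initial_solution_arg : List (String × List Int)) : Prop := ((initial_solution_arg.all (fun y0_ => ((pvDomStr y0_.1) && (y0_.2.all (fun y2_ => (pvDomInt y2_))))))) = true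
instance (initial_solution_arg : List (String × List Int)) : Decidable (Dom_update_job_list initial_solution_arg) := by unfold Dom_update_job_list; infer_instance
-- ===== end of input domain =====

-- B replaces A's nested suffix-rewriting loops by a single running-sum pass (objective: faster).
-- A mutates only its deepcopies, never its argument, so return-value equivalence is the whole story.

-- ===== PORT A =====
-- dict_list[k][1][1] read: out-of-range reads never happen inside Pre_; getD mirrors the in-range access
def pvGetV1 (dl : List (String × List Int)) (k : Nat) : Int := ((dl.getD k ("", [])).2).getD 1 0
-- dict_list[k][1][1] = x : in-place assignment to element 1 of the k-th value list
def pvSetV1 (dl : List (String × List Int)) (k : Nat) (x : Int) : List (String × List Int) :=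
  match dl[k]? with
  | some p => dl.set k (p.1, p.2.set 1 x)
  | none => dl

def update_job_list (initial_solution_arg : List (String × List Int)) : List (String × List Int) :=
  -- dict_list starts as the (deep-copied) items; the frozen copy dict_list_copy read on the
  -- right-hand side equals the untouched argument, so it is initial_solution_arg itself here.
  -- outer while: i = 0 .. n-1; inner while (only when i ≠ 0): k = i .. n-1, j = i-1
  (List.range initial_solution_arg.length).foldl (fun dl i =>
    if i ≠ 0 then
      (List.range' i (initial_solution_arg.length - i)).foldl
        (fun dl k => pvSetV1 dl k (pvGetV1 dl (i - 1) + pvGetV1 initial_solution_arg k)) dl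
    else dl) initial_solution_arg

-- ===== PORT B =====
-- one pass, running total written into slot 1 of a fresh copy of each value list
def pvAltGo (total : Int) : List (String × List Int) → List (String × List Int)
  | [] => []
  | (key, value) :: rest =>
      let t := total + value.getD 1 0
      (key, value.set 1 t) :: pvAltGo t rest

def update_job_list_alt (initial_solution_arg : List (String × List Int)) : List (String × List Int) :=
  pvAltGo 0 initial_solution_arg

-- ===== PRECONDITION & SPEC =====
-- Pre_ excludes dicts containing a value list shorter than 2: whenever the dict has ≥ 2 keys A itself
-- raises IndexError on such input, and on a dict with ≤ 1 keys A returns it untouched only because its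
-- loops never run, while B (naturally) raises IndexError there too.
def Pre_update_job_list (initial_solution_arg : List (String × List Int)) : Prop :=
  ∀ p ∈ initial_solution_arg, 2 ≤ p.2.length
instance (initial_solution_arg : List (String × List Int)) : Decidable (Pre_update_job_list initial_solution_arg) := by unfold Pre_update_job_list; infer_instance

def pvWitness_update_job_list : (List (String × List Int)) := [("a", [1, 2]), ("b", [3, 4]), ("c", [5, 6])]

def Spec_update_job_list (initial_solution_arg : List (String × List Int)) (out : List (String × List Int)) : Prop := out = update_job_list_alt initial_solution_arg
instance (initial_solution_arg : List (String × List Int)) (out : List (String × List Int)) : Decidable (Spec_update_job_list initial_solution_arg out) := by unfold Spec_update_job_list; infer_instance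

-- ===== CLAIM (what is proved, stated in full; the proofs are below) =====
def Claim_equal_update_job_list : Prop := ∀ (initial_solution_arg : List (String × List Int)), Dom_update_job_list initial_solution_arg → Pre_update_job_list initial_solution_arg → Spec_update_job_list initial_solution_arg (update_job_list initial_solution_arg)

-- ===== LEMMAS AND PROOFS =====

-- the common shape of every intermediate state: the input with slot 1 of the m-th value list overwritten by g m
def stV (xs : List (String × List Int)) (g : Nat → Int) : List (String × List Int) :=
  xs.mapIdx (fun m p => (p.1, p.2.set 1 (g m)))

-- prefix sum of the original slot-1 values, indices 0..m
def preV (xs : List (String × List Int)) (m : Nat) : Int :=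
  ((xs.take (m + 1)).map (fun p => p.2.getD 1 0)).sum

-- the slot-1 profile after outer iteration i has completed
def sfV (xs : List (String × List Int)) (i m : Nat) : Int :=
  if m < i then preV xs m else if i = 0 then pvGetV1 xs m else preV xs (i - 1) + pvGetV1 xs m

theorem getElem_stV (xs : List (String × List Int)) (g : Nat → Int) (m : Nat) (hm : m < xs.length) :
    (stV xs g)[m]'(by simpa [stV]) = (xs[m].1, xs[m].2.set 1 (g m)) := by
  simp [stV]

theorem st_congr (xs : List (String × List Int)) (g g' : Nat → Int)
    (h : ∀ m < xs.length, g m = g' m) : stV xs g = stV xs g' := by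
  apply List.ext_getElem (by simp [stV])
  intro m hm _
  rw [getElem_stV xs g m (by simpa [stV] using hm), getElem_stV xs g' m (by simpa [stV] using hm),
    h m (by simpa [stV] using hm)]

theorem st_orig (xs : List (String × List Int)) (h2 : ∀ p ∈ xs, 2 ≤ p.2.length) :
    stV xs (pvGetV1 xs) = xs := by
  apply List.ext_getElem (by simp [stV])
  intro m hm hm'
  have hlen : 2 ≤ xs[m].2.length := h2 _ (List.getElem_mem hm')
  rw [getElem_stV xs _ m hm']
  have : pvGetV1 xs m = xs[m].2[1]'(by omega) := by
    simp [pvGetV1, List.getElem?_eq_getElem hm',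
      List.getElem?_eq_getElem (show 1 < xs[m].2.length by omega)]
  rw [this, List.set_getElem_self]

theorem getV1_st (xs : List (String × List Int)) (g : Nat → Int) (m : Nat)
    (hm : m < xs.length) (h2 : ∀ p ∈ xs, 2 ≤ p.2.length) :
    pvGetV1 (stV xs g) m = g m := by
  have hlen : 2 ≤ xs[m].2.length := h2 _ (List.getElem_mem hm)
  have hm' : m < (stV xs g).length := by simpa [stV]
  simp only [pvGetV1, List.getD_eq_getElem _ _ hm', getElem_stV xs g m hm]
  rw [List.getD_eq_getElem _ _ (by simpa using (by omega : 1 < xs[m].2.length))]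
  simp

theorem setV1_st (xs : List (String × List Int)) (g : Nat → Int) (k : Nat) (x : Int)
    (hk : k < xs.length) :
    pvSetV1 (stV xs g) k x = stV xs (fun m => if m = k then x else g m) := by
  have hk' : k < (stV xs g).length := by simpa [stV]
  simp only [pvSetV1, List.getElem?_eq_getElem hk', getElem_stV xs g k hk, List.set_set]
  apply List.ext_getElem (by simp [stV])
  intro m hm hm'
  have hmx : m < xs.length := by simpa [stV] using hm'
  rcases eq_or_ne m k with rfl | hne
  · rw [List.getElem_set_self, getElem_stV xs _ m hmx]
    simp
  · rw [List.getElem_set_ne (by omega), getElem_stV xs g m hmx, getElem_stV xs _ m hmx]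
    simp [hne]

theorem innerL (xs : List (String × List Int)) (h2 : ∀ p ∈ xs, 2 ≤ p.2.length) (j : Nat) :
    ∀ (l i : Nat) (g : Nat → Int), j < i → i + l ≤ xs.length →
    (List.range' i l).foldl (fun dl k => pvSetV1 dl k (pvGetV1 dl j + pvGetV1 xs k)) (stV xs g)
      = stV xs (fun m => if i ≤ m ∧ m < i + l then g j + pvGetV1 xs m else g m) := by
  intro l
  induction l with
  | zero =>
    intro i g _ _
    simp only [List.range', List.foldl_nil]
    exact st_congr _ _ _ (by intro m _; rw [if_neg (by omega)])
  | succ l ih =>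
    intro i g hj hle
    rw [List.range'_succ, List.foldl_cons]
    have hi : i < xs.length := by omega
    have hjx : j < xs.length := by omega
    rw [getV1_st xs g j hjx h2, setV1_st xs g i _ hi]
    rw [ih (i + 1) _ (by omega) (by omega)]
    apply st_congr
    intro m _
    have hji : ¬ (j = i) := by omega
    by_cases h1 : i + 1 ≤ m ∧ m < i + 1 + l
    · rw [if_pos h1, if_neg hji, if_pos (show i ≤ m ∧ m < i + (l + 1) by omega)]
    · rw [if_neg h1]
      by_cases h2' : m = i
      · rw [h2', if_pos rfl, if_pos (show i ≤ i ∧ i < i + (l + 1) by omega)]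
      · rw [if_neg h2', if_neg (show ¬ (i ≤ m ∧ m < i + (l + 1)) by omega)]

theorem pre0 (xs : List (String × List Int)) (h0 : 0 < xs.length) :
    preV xs 0 = pvGetV1 xs 0 := by
  rcases xs with _ | ⟨p, rest⟩
  · simp at h0
  · simp [preV, pvGetV1]

theorem preS (xs : List (String × List Int)) (m : Nat) (h : m + 1 < xs.length) :
    preV xs (m + 1) = preV xs m + pvGetV1 xs (m + 1) := by
  simp only [preV, List.take_add_one, List.map_append, List.sum_append]
  rw [List.getElem?_eq_getElem h]
  simp [pvGetV1, List.getElem?_eq_getElem h]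

theorem sf_prev (xs : List (String × List Int)) (i : Nat) (h1 : 1 ≤ i) (hi : i ≤ xs.length)
    (h0 : 0 < xs.length) : sfV xs (i - 1) (i - 1) = preV xs (i - 1) := by
  rcases Nat.lt_or_ge (i - 1) 1 with h | h
  · have : i - 1 = 0 := by omega
    rw [this, show sfV xs 0 0 = pvGetV1 xs 0 by simp [sfV]]
    exact (pre0 xs h0).symm
  · simp only [sfV, if_neg (by omega : ¬ i - 1 < i - 1), if_neg (by omega : ¬ i - 1 = 0)]
    obtain ⟨m, hm⟩ : ∃ m, i - 1 = m + 1 := ⟨i - 2, by omega⟩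
    rw [hm, Nat.add_sub_cancel, preS xs m (by omega)]

theorem outerL (xs : List (String × List Int)) (h2 : ∀ p ∈ xs, 2 ≤ p.2.length) :
    ∀ (l i : Nat), 1 ≤ i → i + l = xs.length →
    (List.range' i l).foldl (fun dl i' =>
        if i' ≠ 0 then
          (List.range' i' (xs.length - i')).foldl
            (fun dl k => pvSetV1 dl k (pvGetV1 dl (i' - 1) + pvGetV1 xs k)) dl
        else dl) (stV xs (sfV xs (i - 1)))
      = stV xs (sfV xs (xs.length - 1)) := by
  intro l
  induction l with
  | zero =>
    intro i h1 hn
    simp only [List.range', List.foldl_nil]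
    have : i - 1 = xs.length - 1 := by omega
    rw [this]
  | succ l ih =>
    intro i h1 hn
    rw [List.range'_succ, List.foldl_cons, if_pos (by omega)]
    rw [innerL xs h2 (i - 1) (xs.length - i) i (sfV xs (i - 1)) (by omega) (by omega)]
    have hstep : stV xs (fun m => if i ≤ m ∧ m < i + (xs.length - i) then
        sfV xs (i - 1) (i - 1) + pvGetV1 xs m else sfV xs (i - 1) m) = stV xs (sfV xs i) := by
      apply st_congr
      intro m hm
      rw [sf_prev xs i h1 (by omega) (by omega)]
      by_cases hc : i ≤ m ∧ m < i + (xs.length - i)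
      · rw [if_pos hc]
        simp only [sfV, if_neg (by omega : ¬ m < i), if_neg (by omega : ¬ i = 0)]
      · rw [if_neg hc]
        have hmi : m < i := by omega
        simp only [sfV, if_pos hmi]
        by_cases hm1 : m < i - 1
        · rw [if_pos hm1]
        · have : m = i - 1 := by omega
          subst this
          rw [if_neg hm1]
          rcases Nat.eq_or_lt_of_le h1 with h | h
          · rw [if_pos (show i - 1 = 0 by omega), show i - 1 = 0 by omega]
            exact (pre0 xs (by omega)).symm
          · rw [if_neg (by omega)]
            obtain ⟨m', hm'⟩ : ∃ m', i - 1 = m' + 1 := ⟨i - 2, by omega⟩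
            rw [hm', Nat.add_sub_cancel, preS xs m' (by omega)]
    rw [hstep]
    have := ih (i + 1) (by omega) (by omega)
    rw [Nat.add_sub_cancel] at this
    exact this

theorem altGo_eq (ys : List (String × List Int)) :
    ∀ t : Int, pvAltGo t ys = ys.mapIdx (fun m p => (p.1, p.2.set 1 (t + preV ys m))) := by
  induction ys with
  | nil => intro t; simp [pvAltGo]
  | cons p rest ih =>
    intro t
    obtain ⟨key, value⟩ := p
    rw [List.mapIdx_cons]
    show (key, value.set 1 (t + value.getD 1 0)) :: pvAltGo (t + value.getD 1 0) rest = _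
    congr 1
    · simp [preV]
    · rw [ih (t + value.getD 1 0)]
      congr 1
      funext m p
      simp [preV, List.take_succ_cons, add_assoc]

theorem alt_eq_st (xs : List (String × List Int)) :
    update_job_list_alt xs = stV xs (preV xs) := by
  rw [update_job_list_alt, altGo_eq xs 0, stV]
  congr 1
  funext m p
  simp

-- ===== VERDICT (by name: the statement is the Claim_ definition above) =====
theorem update_job_list_spec : Claim_equal_update_job_list := by
  intro xs _ hpre
  unfold Spec_update_job_list
  rcases Nat.eq_zero_or_pos xs.length with h0 | h0
  · have : xs = [] := List.eq_nil_of_length_eq_zero h0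
    subst this
    rfl
  · show update_job_list xs = update_job_list_alt xs
    rw [update_job_list, List.range_eq_range']
    obtain ⟨l, hl⟩ : ∃ l, xs.length = l + 1 := ⟨xs.length - 1, by omega⟩
    have hr : List.range' 0 xs.length = 0 :: List.range' 1 l := by
      rw [hl, List.range'_succ]
    rw [hr, List.foldl_cons, if_neg (by simp)]
    have hx0 : xs = stV xs (sfV xs 0) := by
      rw [(st_congr xs (sfV xs 0) (pvGetV1 xs) (by intro m _; simp [sfV])), st_orig xs hpre]
    have hout := outerL xs hpre l 1 (by omega) (by omega)
    rw [show (1 : Nat) - 1 = 0 from rfl, ← hx0] at hout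
    rw [hout, alt_eq_st]
    apply st_congr
    intro m hm
    by_cases hc : m < xs.length - 1
    · simp [sfV, hc]
    · have hme : m = xs.length - 1 := by omega
      subst hme
      simp only [sfV, if_neg (by omega : ¬ xs.length - 1 < xs.length - 1)]
      rcases Nat.lt_or_ge xs.length 2 with h | h
      · rw [if_pos (by omega)]
        have : xs.length - 1 = 0 := by omega
        rw [this]
        exact (pre0 xs h0).symm
      · rw [if_neg (by omega)]
        obtain ⟨m', hm'⟩ : ∃ m', xs.length - 1 = m' + 1 := ⟨xs.length - 2, by omega⟩
        rw [hm', Nat.add_sub_cancel, (preS xs m' (by omega)).symm]
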